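-- pv_equiv track=rewrite | github.com/nickswanson15/CIS-211 | waldo.py | all_col_exists_waldo
-- ===== SOURCE A (Python) =====
-- Waldo = 'W'
--
-- def all_col_exists_waldo(collection):
--
--     if len(collection) == 0:
--         return True
--
--     elif collection == [[], []]:
--         return True
--
--     else:
--         value1 = 0
--         value2 = 0
--         value3 = 0
--         # Assigns all the column values to a new list so they are easy to access
--         col0 = [item[0] for item in collection]
--         col1 = [item[1] for item in collection]
--         col2 = [item[2] for item in collection]
--         # Determines if Waldo is in each column
--         for value in col0:
--             if value == Waldo:
--                 value1 = 1
--         for value in col1: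
--             if value == Waldo:
--                 value2 = 1
--         for value in col2:
--             if value == Waldo:
--                 value3 = 1
--
--         if value1 and value2 and value3 == 1:
--             return True
--         else:
--             return False
-- ===== SOURCE B (Python) =====
-- Waldo = 'W'
--
-- def all_col_exists_waldo(collection):
--     # Single row-major pass instead of building three column lists and scanning each.
--     if len(collection) == 0:
--         return True
--     if collection == [[], []]:
--         return True
--     found0 = found1 = found2 = False
--     for row in collection:
--         a, b, c = row[0], row[1], row[2]
--         found0 = found0 or (a == Waldo)
--         found1 = found1 or (b == Waldo)
--         found2 = found2 or (c == Waldo)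
--     return found0 and found1 and found2
-- ===== Notes on version B (the rewrite author's own statement) =====
-- stated objective: simpler
-- what changed: B replaces A's three column-list comprehensions plus three separate scans and int flags with one row-major pass over the rows maintaining three booleans.
import Mathlib
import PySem

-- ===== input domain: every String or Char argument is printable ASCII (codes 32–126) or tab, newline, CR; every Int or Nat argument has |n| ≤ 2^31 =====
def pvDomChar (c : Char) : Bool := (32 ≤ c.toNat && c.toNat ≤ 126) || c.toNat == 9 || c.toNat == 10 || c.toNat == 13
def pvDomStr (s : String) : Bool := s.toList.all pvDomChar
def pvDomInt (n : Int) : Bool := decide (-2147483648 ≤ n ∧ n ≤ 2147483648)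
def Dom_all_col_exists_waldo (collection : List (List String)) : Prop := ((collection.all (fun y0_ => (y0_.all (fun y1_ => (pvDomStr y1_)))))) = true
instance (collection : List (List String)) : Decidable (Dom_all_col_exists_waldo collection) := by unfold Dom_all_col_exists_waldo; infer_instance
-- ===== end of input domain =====

-- B replaces A's three column-list comprehensions plus three separate scans with one row-major pass maintaining three booleans (objective: simpler).


-- ===== PORT A =====
-- item[i] would raise IndexError on short rows; Pre_ excludes those, .getD "" is the out-of-Pre_ default
def all_col_exists_waldo (collection : List (List String)) : Bool :=
  if collection.length == 0 then true
  else if collection == [[], []] then true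
  else
    let col0 := collection.map (fun item => (PySem.List.pyGet? item 0).getD "")
    let col1 := collection.map (fun item => (PySem.List.pyGet? item 1).getD "")
    let col2 := collection.map (fun item => (PySem.List.pyGet? item 2).getD "")
    let value1 : Int := col0.foldl (fun v value => if value == "W" then 1 else v) 0
    let value2 : Int := col1.foldl (fun v value => if value == "W" then 1 else v) 0
    let value3 : Int := col2.foldl (fun v value => if value == "W" then 1 else v) 0
    if value1 != 0 && value2 != 0 && value3 == 1 then true else false

-- ===== PORT B =====
def all_col_exists_waldo_alt (collection : List (List String)) : Bool :=
  if collection.length == 0 then true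
  else if collection == [[], []] then true
  else
    let r := collection.foldl (fun (s : Bool × Bool × Bool) row =>
      let a := (PySem.List.pyGet? row 0).getD ""
      let b := (PySem.List.pyGet? row 1).getD ""
      let c := (PySem.List.pyGet? row 2).getD ""
      (s.1 || a == "W", s.2.1 || b == "W", s.2.2 || c == "W")) (false, false, false)
    r.1 && r.2.1 && r.2.2

-- ===== PRECONDITION & SPEC =====
-- A raises IndexError when some row has fewer than 3 entries (unless a guard clause fires); Pre_ excludes exactly those inputs (B raises there too).
def Pre_all_col_exists_waldo (collection : List (List String)) : Prop :=
  collection = [] ∨ collection = [[], []] ∨ ∀ row ∈ collection, 3 ≤ row.length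
instance (collection : List (List String)) : Decidable (Pre_all_col_exists_waldo collection) := by unfold Pre_all_col_exists_waldo; infer_instance
def pvWitness_all_col_exists_waldo : List (List String) := [["W", "x", "W"], ["y", "W", "z"]]

def Spec_all_col_exists_waldo (collection : List (List String)) (out : Bool) : Prop := out = all_col_exists_waldo_alt collection
instance (collection : List (List String)) (out : Bool) : Decidable (Spec_all_col_exists_waldo collection out) := by unfold Spec_all_col_exists_waldo; infer_instance

-- ===== CLAIM (what is proved, stated in full; the proofs are below) =====
def Claim_equal_all_col_exists_waldo : Prop := ∀ (collection : List (List String)), Dom_all_col_exists_waldo collection → Pre_all_col_exists_waldo collection → Spec_all_col_exists_waldo collection (all_col_exists_waldo collection)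

-- ===== LEMMAS AND PROOFS =====

-- A's per-column loop over a mapped column: 1 if "W" occurs in the column, else the initial accumulator.
theorem foldA_any (l : List (List String)) (f : List String → String) (init : Int) :
    (l.map f).foldl (fun v value => if value == "W" then 1 else v) init
      = (if l.any (fun row => f row == "W") then 1 else init) := by
  induction l generalizing init with
  | nil => simp
  | cons x xs ih =>
    simp only [List.map_cons, List.foldl_cons, List.any_cons]
    by_cases h : (f x == "W") = true
    · rw [if_pos h, ih]; simp [h]
    · rw [if_neg h, ih]; simp [h]

-- B's single pass computes the three "column contains W" booleans (or-ed onto the state).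
theorem foldB_spec (l : List (List String)) (s : Bool × Bool × Bool) :
    l.foldl (fun (s : Bool × Bool × Bool) row =>
      let a := (PySem.List.pyGet? row 0).getD ""
      let b := (PySem.List.pyGet? row 1).getD ""
      let c := (PySem.List.pyGet? row 2).getD ""
      (s.1 || a == "W", s.2.1 || b == "W", s.2.2 || c == "W")) s
    = (s.1 || l.any (fun row => (PySem.List.pyGet? row 0).getD "" == "W"),
       s.2.1 || l.any (fun row => (PySem.List.pyGet? row 1).getD "" == "W"),
       s.2.2 || l.any (fun row => (PySem.List.pyGet? row 2).getD "" == "W")) := by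
  induction l generalizing s with
  | nil => simp
  | cons x xs ih => simp [List.foldl_cons, ih, Bool.or_assoc]

-- ===== VERDICT (by name: the statement is the Claim_ definition above) =====
theorem all_col_exists_waldo_spec : Claim_equal_all_col_exists_waldo := by
  intro collection _ _
  unfold Spec_all_col_exists_waldo all_col_exists_waldo all_col_exists_waldo_alt
  by_cases h0 : collection.length = 0
  · simp [h0]
  · by_cases h1 : collection = [[], []]
    · simp [h1]
    · simp only [foldA_any, foldB_spec, Bool.false_or]
      by_cases a0 : collection.any (fun row => (PySem.List.pyGet? row 0).getD "" == "W") = true <;>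
      by_cases a1 : collection.any (fun row => (PySem.List.pyGet? row 1).getD "" == "W") = true <;>
      by_cases a2 : collection.any (fun row => (PySem.List.pyGet? row 2).getD "" == "W") = true <;>
        simp [a0, a1, a2, h0, h1]
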